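-- pv_equiv track=rewrite | github.com/Patevansh/Python | PFSD/NGE.py | maxele
-- ===== SOURCE A (Python) =====
-- def maxele(li,e):
--   a=b=-1
--   for i in range(len(li)):
--     if li[i]==e:
--       a=i
--       b=e
--     elif a!=-1:
--       if b<li[i]:
--         b=li[i]
--   if b==e:
--     return -1
--   return b
-- ===== SOURCE B (Python) =====
-- def maxele(li, e):
--     best = None
--     for x in reversed(li):
--         if x == e:
--             return best if best is not None and best > e else -1
--         best = x if best is None else max(best, x)
--     return -1
-- ===== Notes on version B (the rewrite author's own statement) =====
-- stated objective: simpler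
-- what changed: Replaced the forward index loop that re-seeds the running value at each occurrence of e with a right-to-left scan keeping the running maximum and stopping early at the last occurrence of e.
import Mathlib
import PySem

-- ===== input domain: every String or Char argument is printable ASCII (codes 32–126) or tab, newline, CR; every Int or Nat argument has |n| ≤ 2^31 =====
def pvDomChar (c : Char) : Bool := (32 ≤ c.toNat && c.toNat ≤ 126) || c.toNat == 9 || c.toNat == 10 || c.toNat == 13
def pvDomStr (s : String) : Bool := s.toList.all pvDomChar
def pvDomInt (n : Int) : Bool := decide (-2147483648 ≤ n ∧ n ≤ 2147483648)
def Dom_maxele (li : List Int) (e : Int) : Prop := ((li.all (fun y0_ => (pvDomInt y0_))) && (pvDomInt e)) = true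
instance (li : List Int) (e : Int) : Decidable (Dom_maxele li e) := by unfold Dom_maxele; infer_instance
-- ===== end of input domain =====

-- B replaces A's forward index loop (which re-seeds its running value at each occurrence
-- of e) with a right-to-left scan keeping the running maximum, stopping at the last e. (simpler)

-- ===== PORT A =====
-- forward loop over i in range(len(li)), state (a, b) as in the Python
def maxele (li : List Int) (e : Int) : Int :=
  let ab := (PySem.List.enumerate li 0).foldl
    (fun (ab : Int × Int) (p : Int × Int) =>
      if p.2 == e then (p.1, e)
      else if ab.1 != -1 then (if ab.2 < p.2 then (ab.1, p.2) else ab)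
      else ab)
    (-1, -1)
  if ab.2 == e then -1 else ab.2

-- ===== PORT B =====
-- the 'for x in reversed(li)' loop with early return at x == e
def maxeleAltGo (e : Int) : List Int → Option Int → Int
  | [], _ => -1
  | x :: rest, best =>
    if x == e then
      match best with
      | some b => if b > e then b else -1
      | none => -1
    else maxeleAltGo e rest (some (match best with | none => x | some b => max b x))

def maxele_alt (li : List Int) (e : Int) : Int := maxeleAltGo e li.reverse none

-- ===== PRECONDITION & SPEC =====
def Spec_maxele (li : List Int) (e : Int) (out : Int) : Prop := out = maxele_alt li e
instance (li : List Int) (e : Int) (out : Int) : Decidable (Spec_maxele li e out) := by unfold Spec_maxele; infer_instance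

-- ===== CLAIM (what is proved, stated in full; the proofs are below) =====
def Claim_equal_maxele : Prop := ∀ (li : List Int) (e : Int), Dom_maxele li e → Spec_maxele li e (maxele li e)

-- ===== LEMMAS AND PROOFS =====

-- A's loop body, as a step on a (seen, b) state: the index a only matters via a ≠ -1
def stepA (e : Int) (sb : Bool × Int) (x : Int) : Bool × Int :=
  if x = e then (true, e) else if sb.1 then (true, if sb.2 < x then x else sb.2) else sb

-- B's accumulator update
def obmax (best : Option Int) (x : Int) : Option Int :=
  some (match best with | none => x | some b => max b x)

lemma bridgeA (e : Int) : ∀ (li : List Int) (s a b : Int), 0 ≤ s → -1 ≤ a →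
    ((PySem.List.enumerate li s).foldl
      (fun (ab : Int × Int) (p : Int × Int) =>
        if p.2 == e then (p.1, e)
        else if ab.1 != -1 then (if ab.2 < p.2 then (ab.1, p.2) else ab)
        else ab) (a, b)).2
      = (li.foldl (stepA e) (a != -1, b)).2 := by
  intro li
  induction li with
  | nil => intro s a b _ _; simp [PySem.List.enumerate_nil]
  | cons x t ih =>
    intro s a b hs ha
    rw [PySem.List.enumerate_cons]
    by_cases hx : x = e
    · subst hx
      have h1 : ((s, x) : Int × Int).2 == x := by simp
      simp only [List.foldl_cons, stepA, h1, if_true]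
      have hane : (s != -1) = true := by simp [bne]; omega
      have := ih (s + 1) s x (by omega) (by omega)
      rw [hane] at this
      simpa using this
    · have hbe : (x == e) = false := by simp [hx]
      simp only [List.foldl_cons, stepA, hbe, if_neg hx, Bool.false_eq_true, if_false]
      by_cases hai : a = -1
      · subst hai
        have : ((-1 : Int) != -1) = false := by simp
        rw [this]
        simpa using ih (s + 1) (-1) b (by omega) (by omega)
      · have hane : (a != -1) = true := by simp [bne, hai]
        rw [hane]
        simp only [if_true]
        by_cases hlt : b < x
        · rw [if_pos hlt, if_pos hlt]
          have h := ih (s + 1) a x (by omega) ha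
          rw [hane] at h; exact h
        · rw [if_neg hlt, if_neg hlt]
          have h := ih (s + 1) a b (by omega) ha
          rw [hane] at h; exact h

lemma foldA_noE (e : Int) : ∀ (l : List Int) (b : Int), e ∉ l →
    l.foldl (stepA e) (false, b) = (false, b) := by
  intro l
  induction l with
  | nil => intro b _; simp
  | cons x t ih =>
    intro b hm
    have hx : x ≠ e := fun h => hm (h ▸ List.mem_cons_self)
    simp only [List.foldl_cons, stepA, if_neg hx, Bool.false_eq_true, if_false]
    exact ih b (fun h => hm (List.mem_cons_of_mem _ h))

lemma foldA_seen (e : Int) : ∀ (l : List Int) (b : Int), e ∉ l →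
    l.foldl (stepA e) (true, b) = (true, l.foldl max b) := by
  intro l
  induction l with
  | nil => intro b _; simp
  | cons x t ih =>
    intro b hm
    have hx : x ≠ e := fun h => hm (h ▸ List.mem_cons_self)
    have hmax : (if b < x then x else b) = max b x := by
      by_cases h : b < x
      · rw [if_pos h, max_eq_right h.le]
      · rw [if_neg h, max_eq_left (Int.not_lt.mp h)]
    simp only [List.foldl_cons, stepA, if_neg hx, if_true, hmax]
    exact ih (max b x) (fun h => hm (List.mem_cons_of_mem _ h))

lemma goB_skip (e : Int) : ∀ (l rest : List Int) (best : Option Int), e ∉ l →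
    maxeleAltGo e (l ++ rest) best = maxeleAltGo e rest (l.foldl obmax best) := by
  intro l
  induction l with
  | nil => intro rest best _; simp
  | cons x t ih =>
    intro rest best hm
    have hx : x ≠ e := fun h => hm (h ▸ List.mem_cons_self)
    have hbe : (x == e) = false := by simp [hx]
    simp only [List.cons_append, maxeleAltGo, hbe, Bool.false_eq_true, if_false, List.foldl_cons]
    exact ih rest (obmax best x) (fun h => hm (List.mem_cons_of_mem _ h))

lemma obmax_some : ∀ (l : List Int) (b : Int), l.foldl obmax (some b) = some (l.foldl max b) := by
  intro l
  induction l with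
  | nil => intro b; simp
  | cons x t ih => intro b; simp only [List.foldl_cons, obmax]; exact ih (max b x)

lemma foldl_max_pull : ∀ (l : List Int) (a b : Int), l.foldl max (max a b) = max a (l.foldl max b) := by
  intro l
  induction l with
  | nil => intro a b; simp
  | cons x t ih =>
    intro a b
    simp only [List.foldl_cons]
    rw [max_assoc, ih]

lemma foldl_max_reverse : ∀ (l : List Int) (b : Int), l.reverse.foldl max b = l.foldl max b := by
  intro l
  induction l with
  | nil => intro b; simp
  | cons x t ih =>
    intro b
    simp only [List.reverse_cons, List.foldl_append, List.foldl_cons, List.foldl_nil,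
      List.foldl_cons]
    rw [ih, max_comm b x, foldl_max_pull, max_comm]

lemma lastE_decomp (e : Int) : ∀ (li : List Int), e ∈ li → ∃ p s, li = p ++ e :: s ∧ e ∉ s := by
  intro li
  induction li using List.reverseRecOn with
  | nil => intro h; exact absurd h (List.not_mem_nil)
  | append_singleton ys x ih =>
    intro h
    by_cases hx : x = e
    · exact ⟨ys, [], by simp [hx], by simp⟩
    · have hmem : e ∈ ys := by
        rcases List.mem_append.mp h with h1 | h1
        · exact h1
        · simp at h1; exact absurd h1.symm hx
      obtain ⟨p, s, hsplit, hns⟩ := ih hmem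
      refine ⟨p, s ++ [x], by simp [hsplit], ?_⟩
      intro hc
      rcases List.mem_append.mp hc with h1 | h1
      · exact hns h1
      · simp at h1; exact hx h1.symm

-- ===== VERDICT (by name: the statement is the Claim_ definition above) =====
theorem maxele_spec : Claim_equal_maxele := by
  intro li e _
  show maxele li e = maxele_alt li e
  unfold maxele maxele_alt
  have hbr := bridgeA e li 0 (-1) (-1) (by omega) (by omega)
  have hfalse : ((-1 : Int) != -1) = false := by simp
  rw [hfalse] at hbr
  simp only [hbr]
  by_cases he : e ∈ li
  · obtain ⟨p, s, hsplit, hns⟩ := lastE_decomp e li he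
    subst hsplit
    -- A side
    have hA : ((p ++ e :: s).foldl (stepA e) (false, -1)).2 = s.foldl max e := by
      rw [List.foldl_append, List.foldl_cons]
      have hstep : stepA e (p.foldl (stepA e) (false, -1)) e = (true, e) := by
        simp [stepA]
      rw [hstep, foldA_seen e s e hns]
    rw [hA]
    -- B side
    have hrev : (p ++ e :: s).reverse = s.reverse ++ e :: p.reverse := by
      simp
    rw [hrev, goB_skip e s.reverse (e :: p.reverse) none (by simpa using hns)]
    cases hsr : s.reverse with
    | nil =>
      have hsnil : s = [] := by
        have := congrArg List.reverse hsr; simpa using this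
      subst hsnil
      simp [maxeleAltGo]
    | cons x t =>
      have hs : s = t.reverse ++ [x] := by
        have := congrArg List.reverse hsr; simpa using this
      simp only [List.foldl_cons, obmax, obmax_some]
      have hM : t.foldl max x = max x (t.foldl max x) := by
        have : x ≤ t.foldl max x := by
          have : ∀ (l : List Int) (b : Int), b ≤ l.foldl max b := by
            intro l
            induction l with
            | nil => intro b; simp
            | cons c r ih => intro b; exact le_trans (le_max_left b c) (ih (max b c))
          exact this t x
        omega
      have hm : s.foldl max e = max e (t.foldl max x) := by
        rw [hs, List.foldl_append, List.foldl_cons, List.foldl_nil, foldl_max_reverse]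
        rw [max_comm (t.foldl max e) x, ← foldl_max_pull, max_comm x e, foldl_max_pull]
      rw [hm]
      simp only [maxeleAltGo, beq_self_eq_true, if_true]
      set M := t.foldl max x with hMdef
      by_cases hMe : e < M
      · rw [if_pos hMe, max_eq_right hMe.le]
        have : (M == e) = false := by simp; omega
        rw [this]; simp
      · rw [if_neg hMe]
        have : max e M = e := max_eq_left (not_lt.mp hMe)
        rw [this]; simp
  · -- e not in li
    rw [foldA_noE e li (-1) he]
    have hBnil : maxeleAltGo e (li.reverse ++ []) none = maxeleAltGo e [] (li.reverse.foldl obmax none) :=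
      goB_skip e li.reverse [] none (by simpa using he)
    rw [List.append_nil] at hBnil
    rw [hBnil]
    simp only [maxeleAltGo]
    by_cases h1 : (-1 : Int) = e <;> simp [h1]
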